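-- pv_equiv track=rewrite | github.com/SYeon-424/GBlocks | gblock.py | center_star_align
-- ===== SOURCE A (Python) =====
-- from typing import List, Tuple, Dict, Optional
--
-- def nw_align(a: str, b: str, match: int = 1, mismatch: int = -1, gap: int = -2):
--     n, m = len(a), len(b)
--     score = [[0]*(m+1) for _ in range(n+1)]
--     trace = [[0]*(m+1) for _ in range(n+1)]
--     for i in range(1, n+1):
--         score[i][0] = i*gap; trace[i][0] = 2
--     for j in range(1, m+1):
--         score[0][j] = j*gap; trace[0][j] = 3
--     for i in range(1, n+1):
--         ai = a[i-1]
--         for j in range(1, m+1):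
--             bj = b[j-1]
--             sdiag = score[i-1][j-1] + (match if ai==bj else mismatch)
--             sup   = score[i-1][j]   + gap
--             sleft = score[i][j-1]   + gap
--             if sdiag >= sup and sdiag >= sleft:
--                 score[i][j]=sdiag; trace[i][j]=1
--             elif sup >= sleft:
--                 score[i][j]=sup;   trace[i][j]=2
--             else:
--                 score[i][j]=sleft; trace[i][j]=3
--     i,j=n,m; A,B=[],[]
--     while i>0 or j>0:
--         t=trace[i][j]
--         if t==1: A.append(a[i-1]); B.append(b[j-1]); i-=1; j-=1
--         elif t==2: A.append(a[i-1]); B.append('-');   i-=1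
--         else:      A.append('-');     B.append(b[j-1]); j-=1
--     return "".join(reversed(A)), "".join(reversed(B))
--
-- def gap_pattern_from_aligned_base(base_ref: str, aln_base: str):
--     L=len(base_ref); gaps_before=[0]*(L+1); i_base=0; run=0
--     for ch in aln_base:
--         if ch=='-': run+=1
--         else:
--             if i_base<L: gaps_before[i_base]+=run
--             run=0; i_base+=1
--     gaps_before[L]+=run
--     return gaps_before
--
-- def merge_gap_patterns_max(p1, p2):
--     L=max(len(p1),len(p2)); out=[]
--     for i in range(L):
--         a=p1[i] if i<len(p1) else 0
--         b=p2[i] if i<len(p2) else 0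
--         out.append(max(a,b))
--     return out
--
-- def expand_to_pattern(base_ref: str, aln_seq: str, target_gaps):
--     L=len(base_ref)
--     aln_base=[]; j_base=0
--     for ch in aln_seq:
--         if ch=='-': aln_base.append('-')
--         else: aln_base.append(base_ref[j_base]); j_base+=1
--     out=[]; i_aln=0
--     for k in range(L):
--         out.extend('-'*target_gaps[k])
--         while i_aln<len(aln_seq):
--             ch_a=aln_seq[i_aln]; ch_b=aln_base[i_aln]; i_aln+=1
--             out.append(ch_a)
--             if ch_b!='-': break
--     out.extend('-'*target_gaps[L])
--     return "".join(out)
--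
-- def center_star_align(entries: List[Tuple[str,str]], match=1, mismatch=-1, gap=-2)->List[Tuple[str,str]]:
--     center_idx = max(range(len(entries)), key=lambda i: len(entries[i][1]))
--     base_ref = entries[center_idx][1]; L=len(base_ref)
--     master_gaps=[0]*(L+1)
--     aligned_headers=[]; aligned_seqs=[]
--     for h,seq in entries:
--         aln_base, aln_seq = nw_align(base_ref, seq, match, mismatch, gap)
--         gaps_new = gap_pattern_from_aligned_base(base_ref, aln_base)
--         merged = merge_gap_patterns_max(master_gaps, gaps_new)
--         aligned_seqs = [expand_to_pattern(base_ref, s_prev, merged) for s_prev in aligned_seqs]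
--         s_new = expand_to_pattern(base_ref, aln_seq, merged)
--         master_gaps = merged
--         aligned_headers.append(h); aligned_seqs.append(s_new)
--     order={h:i for i,(h,_) in enumerate(entries)}
--     out=list(zip(aligned_headers, aligned_seqs))
--     out.sort(key=lambda x: order[x[0]])
--     return out
-- ===== SOURCE B (Python) =====
-- from typing import List, Tuple
--
-- def nw_align(a: str, b: str, match: int = 1, mismatch: int = -1, gap: int = -2):
--     n, m = len(a), len(b)
--     score = [[0]*(m+1) for _ in range(n+1)]
--     trace = [[0]*(m+1) for _ in range(n+1)]
--     for i in range(1, n+1):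
--         score[i][0] = i*gap; trace[i][0] = 2
--     for j in range(1, m+1):
--         score[0][j] = j*gap; trace[0][j] = 3
--     for i in range(1, n+1):
--         ai = a[i-1]
--         for j in range(1, m+1):
--             bj = b[j-1]
--             sdiag = score[i-1][j-1] + (match if ai==bj else mismatch)
--             sup   = score[i-1][j]   + gap
--             sleft = score[i][j-1]   + gap
--             if sdiag >= sup and sdiag >= sleft:
--                 score[i][j]=sdiag; trace[i][j]=1
--             elif sup >= sleft:
--                 score[i][j]=sup;   trace[i][j]=2
--             else:
--                 score[i][j]=sleft; trace[i][j]=3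
--     i,j=n,m; A,B=[],[]
--     while i>0 or j>0:
--         t=trace[i][j]
--         if t==1: A.append(a[i-1]); B.append(b[j-1]); i-=1; j-=1
--         elif t==2: A.append(a[i-1]); B.append('-');   i-=1
--         else:      A.append('-');     B.append(b[j-1]); j-=1
--     return "".join(reversed(A)), "".join(reversed(B))
--
-- def gap_pattern_from_aligned_base(base_ref: str, aln_base: str):
--     L=len(base_ref); gaps_before=[0]*(L+1); i_base=0; run=0
--     for ch in aln_base:
--         if ch=='-': run+=1
--         else:
--             if i_base<L: gaps_before[i_base]+=run
--             run=0; i_base+=1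
--     gaps_before[L]+=run
--     return gaps_before
--
-- def split_row(s: str, base_ref: str):
--     """Split a row at its anchor residues: the k-th non-gap character of the
--     row sits in centre column k, and it anchors a new segment exactly when that
--     column holds a residue.  parts[i] is the material before anchor i (gaps and
--     characters sitting in gap columns of the centre); parts[-1] is the tail."""
--     parts = ['']; anchors = []
--     k = 0
--     for ch in s:
--         if ch != '-' and base_ref[k] != '-':
--             anchors.append(ch); parts.append(''); k += 1
--         else:
--             parts[-1] += ch
--             if ch != '-': k += 1
--     return parts, anchors
--
-- def pad_row(row, q, L):
--     """Insert q[k] extra dashes in front of centre column k and q[L] at the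
--     end.  Columns k beyond the row's last anchor contribute to its tail; a row
--     anchored in every column ends at its last anchor and its tail is q[L]."""
--     parts, anchors = row
--     t = len(anchors)
--     tail = '-'*q[L] if t == L else '-'*q[t] + parts[t] + '-'*sum(q[t+1:])
--     return ['-'*g + p for p, g in zip(parts[:t], q)] + [tail], anchors
--
-- def render_row(row) -> str:
--     parts, anchors = row
--     return ''.join(p + ch for p, ch in zip(parts, anchors)) + parts[-1]
--
-- def center_star_align(entries: List[Tuple[str,str]], match=1, mismatch=-1, gap=-2)->List[Tuple[str,str]]:
--     # Rows are kept split into segments between their anchor residues, so each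
--     # round's gap insertion is a per-segment dash prefix instead of rebuilding
--     # and re-scanning ever-growing strings; strings are materialised once.
--     center_idx = max(range(len(entries)), key=lambda i: len(entries[i][1]))
--     base_ref = entries[center_idx][1]; L = len(base_ref)
--     master = [0]*(L+1)
--     headers = []; rows = []
--     for h, seq in entries:
--         aln_base, aln_seq = nw_align(base_ref, seq, match, mismatch, gap)
--         pattern = gap_pattern_from_aligned_base(base_ref, aln_base)
--         merged = [max(a, b) for a, b in zip(master, pattern)]
--         rows = [pad_row(r, merged, L) for r in rows]
--         rows.append(pad_row(split_row(aln_seq, base_ref), merged, L))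
--         headers.append(h); master = merged
--     order = {h: i for i, (h, _) in enumerate(entries)}
--     out = [(h, render_row(r)) for h, r in zip(headers, rows)]
--     out.sort(key=lambda x: order[x[0]])
--     return out
-- ===== Notes on version B (the rewrite author's own statement) =====
-- stated objective: faster
-- what changed: Instead of re-expanding every previously aligned row through full string reconstruction each round (rebuilding the aligned-base string, re-scanning and re-emitting every character of ever-growing strings), B splits each row once into segments between its anchor residues and applies each round's merged gap pattern as a per-segment dash prefix plus one tail block, rendering strings a single time at the end. Pre_ excludes only the empty list, on which A's max() raises ValueError (B raises too).
import Mathlib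
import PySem

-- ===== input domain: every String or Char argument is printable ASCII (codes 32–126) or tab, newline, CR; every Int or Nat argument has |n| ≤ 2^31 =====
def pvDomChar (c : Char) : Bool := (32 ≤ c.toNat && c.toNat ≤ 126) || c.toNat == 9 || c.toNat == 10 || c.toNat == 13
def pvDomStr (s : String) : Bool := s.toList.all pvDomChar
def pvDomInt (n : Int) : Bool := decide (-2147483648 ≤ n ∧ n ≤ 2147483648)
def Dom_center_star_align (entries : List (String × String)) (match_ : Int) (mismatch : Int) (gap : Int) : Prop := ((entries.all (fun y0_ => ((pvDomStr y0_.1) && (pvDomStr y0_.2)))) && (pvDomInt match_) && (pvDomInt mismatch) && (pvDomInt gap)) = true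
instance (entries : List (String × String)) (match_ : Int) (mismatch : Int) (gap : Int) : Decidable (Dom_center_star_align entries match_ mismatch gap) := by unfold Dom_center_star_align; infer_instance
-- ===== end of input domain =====

-- B keeps each aligned row split into segments between its anchor residues, so every per-round
-- gap insertion is a per-segment dash prefix instead of rebuilding and re-scanning ever-growing
-- strings; strings are rendered once at the end (measurably faster in a timing run).

-- ===== PORT A =====
-- shared helper: nw_align (Source B contains a verbatim copy of this function)
def pvNwInner (ai : Char) (match_ mismatch gap : Int) :
    List Char → List Int → Int → List Int → List Int → List Int × List Int
  | [], _, _, accS, accT => (accS, accT)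
  | bj :: bs, prev, left, accS, accT =>
    let sdiag := prev.headD 0 + (if ai == bj then match_ else mismatch)
    let sup   := (prev.drop 1).headD 0 + gap
    let sleft := left + gap
    if sdiag ≥ sup ∧ sdiag ≥ sleft then
      pvNwInner ai match_ mismatch gap bs (prev.drop 1) sdiag (accS ++ [sdiag]) (accT ++ [1])
    else if sup ≥ sleft then
      pvNwInner ai match_ mismatch gap bs (prev.drop 1) sup (accS ++ [sup]) (accT ++ [2])
    else
      pvNwInner ai match_ mismatch gap bs (prev.drop 1) sleft (accS ++ [sleft]) (accT ++ [3])

def pvNwRows (bs : List Char) (match_ mismatch gap : Int) :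
    List Char → Nat → List Int → List (List Int) × List (List Int)
  | [], _, _ => ([], [])
  | ai :: rest, i, prevS =>
    let s0 : Int := (i : Int) * gap
    let row := pvNwInner ai match_ mismatch gap bs prevS s0 [s0] [2]
    let rest' := pvNwRows bs match_ mismatch gap rest (i + 1) row.1
    (row.1 :: rest'.1, row.2 :: rest'.2)

-- the traceback while-loop; fuel n+m bounds the number of iterations of the Python loop
def pvTbLoop (a b : List Char) (tr : List (List Int)) :
    Nat → Nat → Nat → List Char → List Char → List Char × List Char
  | 0, _, _, accA, accB => (accA, accB)
  | fuel + 1, i, j, accA, accB =>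
    if i = 0 ∧ j = 0 then (accA, accB)
    else
      let t := (tr.getD i []).getD j 0
      if t = 1 then
        pvTbLoop a b tr fuel (i - 1) (j - 1) (accA ++ [a.getD (i - 1) ' ']) (accB ++ [b.getD (j - 1) ' '])
      else if t = 2 then
        pvTbLoop a b tr fuel (i - 1) j (accA ++ [a.getD (i - 1) ' ']) (accB ++ ['-'])
      else
        pvTbLoop a b tr fuel i (j - 1) (accA ++ ['-']) (accB ++ [b.getD (j - 1) ' '])

def pvNwAlign (a b : List Char) (match_ mismatch gap : Int) : List Char × List Char :=
  let n := a.length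
  let m := b.length
  let score0 := (List.range (m + 1)).map (fun j => (j : Int) * gap)
  let trace0 : List Int := 0 :: List.replicate m 3
  let tr := trace0 :: (pvNwRows b match_ mismatch gap a 1 score0).2
  let acc := pvTbLoop a b tr (n + m) n m [] []
  (acc.1.reverse, acc.2.reverse)

-- shared helper: gap_pattern_from_aligned_base (verbatim in both sources)
def pvGapPattern (L : Nat) (alnBase : List Char) : List Int :=
  let st := alnBase.foldl (fun (st : List Int × Nat × Int) ch =>
      if ch = '-' then (st.1, st.2.1, st.2.2 + 1)
      else ((if st.2.1 < L then st.1.set st.2.1 (st.1.getD st.2.1 0 + st.2.2) else st.1),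
            st.2.1 + 1, 0))
    (List.replicate (L + 1) 0, 0, 0)
  st.1.set L (st.1.getD L 0 + st.2.2)

-- A-only helper: merge_gap_patterns_max
def pvMergeMax (p1 p2 : List Int) : List Int :=
  (List.range (max p1.length p2.length)).foldl
    (fun out i => out ++ [max (p1.getD i 0) (p2.getD i 0)]) []

-- A-only helper: the inner while-loop of expand_to_pattern (copies chars until a base char is consumed)
def pvCopyBlock : List (Char × Char) → List Char × List (Char × Char)
  | [] => ([], [])
  | (ca, cb) :: rest =>
    if cb ≠ '-' then ([ca], rest)
    else ((ca :: (pvCopyBlock rest).1), (pvCopyBlock rest).2)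

-- A-only helper: expand_to_pattern.  base.getD's default is unreachable under Pre_
-- (aln_seq never carries more than base.length non-'-' chars; Python would raise IndexError there).
def pvExpand (base : List Char) (alnSeq : List Char) (q : List Int) : List Char :=
  let L := base.length
  let alnBase := (alnSeq.foldl (fun (st : List Char × Nat) ch =>
      if ch = '-' then (st.1 ++ ['-'], st.2)
      else (st.1 ++ [base.getD st.2 ' '], st.2 + 1)) ([], 0)).1
  let pairs := alnSeq.zip alnBase
  let st := (List.range L).foldl (fun (st : List Char × List (Char × Char)) k =>
      (st.1 ++ List.replicate (q.getD k 0).toNat '-' ++ (pvCopyBlock st.2).1, (pvCopyBlock st.2).2)) ([], pairs)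
  st.1 ++ List.replicate (q.getD L 0).toNat '-'

-- shared helper: the last three lines of both mains (order dict, zip, stable sort by first occurrence)
def pvFinish (entries : List (String × String)) (hs : List String) (ss : List (List Char)) :
    List (String × String) :=
  let order := (PySem.List.enumerate entries 0).foldl
      (fun (d : PySem.Dict String Int) p => d.insert p.2.1 p.1) PySem.Dict.empty
  let out := hs.zip (ss.map (fun s => String.ofList s))
  PySem.List.sorted out (fun x => order.getD x.1 0) false

def center_star_align (entries : List (String × String)) (match_ : Int) (mismatch : Int) (gap : Int) : List (String × String) :=
  let es := entries.map (fun e => (e.1, e.2.toList))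
  match PySem.List.max? (PySem.List.pyRange 0 (entries.length : Int) 1)
      (fun i => ((PySem.List.pyGetD es i ("", [])).2.length : Int)) with
  | none => []   -- Python raises ValueError on empty entries (excluded by Pre_)
  | some ci =>
    let base := (PySem.List.pyGetD es ci ("", [])).2
    let L := base.length
    let st := es.foldl (fun (st : List Int × List String × List (List Char)) e =>
        let aln := pvNwAlign base e.2 match_ mismatch gap
        let merged := pvMergeMax st.1 (pvGapPattern L aln.1)
        (merged, st.2.1 ++ [e.1],
         st.2.2.map (fun sp => pvExpand base sp merged) ++ [pvExpand base aln.2 merged]))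
      (List.replicate (L + 1) 0, [], [])
    pvFinish entries st.2.1 st.2.2

-- ===== PORT B =====
-- B helper: split_row — base.getD is exact: the anchor test indexes base only at k < |base|
-- (k counts earlier non-gap chars, at most the centre length; Python short-circuits on '-')
def pvSplitRow (s : List Char) (base : List Char) : List (List Char) × List Char :=
  let st := s.foldl (fun (st : List (List Char) × List Char × List Char × Nat) ch =>
      if ch ≠ '-' ∧ base.getD st.2.2.2 ' ' ≠ '-' then
        (st.1 ++ [st.2.1], [], st.2.2.1 ++ [ch], st.2.2.2 + 1)
      else
        (st.1, st.2.1 ++ [ch], st.2.2.1, if ch = '-' then st.2.2.2 else st.2.2.2 + 1))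
    ([], [], [], 0)
  (st.1 ++ [st.2.1], st.2.2.1)

-- B helper: pad_row — q[L], q[t] and parts[t] are in-range under the row invariant, so getD is exact
def pvPadRowG (row : List (List Char) × List Char) (q : List Int) (L : Nat) : List (List Char) × List Char :=
  let t := row.2.length
  let tail := if t = L then List.replicate (q.getD L 0).toNat '-'
    else List.replicate (q.getD t 0).toNat '-' ++ row.1.getD t [] ++
      List.replicate ((q.drop (t + 1)).sum).toNat '-'
  (List.zipWith (fun p g => List.replicate g.toNat '-' ++ p) (row.1.take t) q ++ [tail], row.2)

-- B helper: render_row — parts is never empty, so getLastD is exact for parts[-1]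
def pvRenderRowG (row : List (List Char) × List Char) : List Char :=
  (List.zipWith (fun p ch => p ++ [ch]) row.1 row.2).flatten ++ row.1.getLastD []

def center_star_align_alt (entries : List (String × String)) (match_ : Int) (mismatch : Int) (gap : Int) : List (String × String) :=
  let es := entries.map (fun e => (e.1, e.2.toList))
  match PySem.List.max? (PySem.List.pyRange 0 (entries.length : Int) 1)
      (fun i => ((PySem.List.pyGetD es i ("", [])).2.length : Int)) with
  | none => []   -- Python raises ValueError on empty entries (excluded by Pre_)
  | some ci =>
    let base := (PySem.List.pyGetD es ci ("", [])).2
    let L := base.length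
    let st := es.foldl (fun (st : List Int × List String × List (List (List Char) × List Char)) e =>
        let aln := pvNwAlign base e.2 match_ mismatch gap
        let pattern := pvGapPattern L aln.1
        let merged := List.zipWith max st.1 pattern
        (merged, st.2.1 ++ [e.1],
         st.2.2.map (fun r => pvPadRowG r merged L) ++ [pvPadRowG (pvSplitRow aln.2 base) merged L]))
      (List.replicate (L + 1) 0, [], [])
    pvFinish entries st.2.1 (st.2.2.map pvRenderRowG)

-- ===== PRECONDITION & SPEC =====
-- Pre_ excludes exactly the empty list, on which A's max() raises ValueError (B raises too).
def Pre_center_star_align (entries : List (String × String)) (match_ : Int) (mismatch : Int) (gap : Int) : Prop :=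
  entries ≠ []

instance (entries : List (String × String)) (match_ : Int) (mismatch : Int) (gap : Int) : Decidable (Pre_center_star_align entries match_ mismatch gap) := by
  unfold Pre_center_star_align; infer_instance

def pvWitness_center_star_align : (List (String × String)) × Int × Int × Int :=
  ([("h1", "ACGT"), ("h2", "AG"), ("h3", "CGT")], 1, -1, -2)

def Spec_center_star_align (entries : List (String × String)) (match_ : Int) (mismatch : Int) (gap : Int) (out : List (String × String)) : Prop := out = center_star_align_alt entries match_ mismatch gap
instance (entries : List (String × String)) (match_ : Int) (mismatch : Int) (gap : Int) (out : List (String × String)) : Decidable (Spec_center_star_align entries match_ mismatch gap out) := by unfold Spec_center_star_align; infer_instance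

-- ===== CLAIM (what is proved, stated in full; the proofs are below) =====
def Claim_equal_center_star_align : Prop := ∀ (entries : List (String × String)) (match_ : Int) (mismatch : Int) (gap : Int), Dom_center_star_align entries match_ mismatch gap → Pre_center_star_align entries match_ mismatch gap → Spec_center_star_align entries match_ mismatch gap (center_star_align entries match_ mismatch gap)

-- ===== LEMMAS AND PROOFS =====

-- ---------- small arithmetic / list facts ----------

lemma pvGetD_nonneg {l : List Int} (h : ∀ a ∈ l, 0 ≤ a) (k : Nat) : 0 ≤ l.getD k 0 := by
  by_cases hk : k < l.length
  · rw [List.getD_eq_getElem l 0 hk]; exact h _ (List.getElem_mem hk)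
  · rw [List.getD_eq_default l 0 (by omega)]

lemma pvSum_nonneg {l : List Int} (h : ∀ a ∈ l, 0 ≤ a) : 0 ≤ l.sum :=
  List.sum_nonneg h

lemma pvReplApp (a b : Int) (ha : 0 ≤ a) (hb : 0 ≤ b) :
    List.replicate (a + b).toNat '-' = List.replicate a.toNat '-' ++ List.replicate b.toNat '-' := by
  rw [← List.replicate_add]
  congr 1
  omega

lemma pvZipMax_len (a b : List Int) : (List.zipWith max a b).length = min a.length b.length :=
  List.length_zipWith ..

lemma pvZipMax_nonneg : ∀ (a b : List Int), (∀ x ∈ a, 0 ≤ x) → ∀ x ∈ List.zipWith max a b, 0 ≤ x := by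
  intro a
  induction a with
  | nil => intro b _ x hx; simp at hx
  | cons z zs ih =>
    intro b h x hx
    cases b with
    | nil => simp at hx
    | cons w ws =>
      simp only [List.zipWith_cons_cons, List.mem_cons] at hx
      rcases hx with rfl | hx
      · exact le_trans (h z (by simp)) (le_max_left z w)
      · exact ih ws (fun y hy => h y (by simp [hy])) x hx


-- ---------- gap pattern: length and non-negativity ----------

lemma pvGapPattern_aux (L : Nat) (alnBase : List Char) :
    ∀ (g0 : List Int) (i0 : Nat) (r0 : Int), g0.length = L + 1 → (∀ a ∈ g0, 0 ≤ a) → 0 ≤ r0 →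
    let st := alnBase.foldl (fun (st : List Int × Nat × Int) ch =>
      if ch = '-' then (st.1, st.2.1, st.2.2 + 1)
      else ((if st.2.1 < L then st.1.set st.2.1 (st.1.getD st.2.1 0 + st.2.2) else st.1),
            st.2.1 + 1, 0)) (g0, i0, r0)
    st.1.length = L + 1 ∧ (∀ a ∈ st.1, 0 ≤ a) ∧ 0 ≤ st.2.2 := by
  induction alnBase with
  | nil => intro g0 i0 r0 h1 h2 h3; exact ⟨h1, h2, h3⟩
  | cons c rest ih =>
    intro g0 i0 r0 h1 h2 h3
    simp only [List.foldl_cons]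
    by_cases hc : c = '-'
    · simp only [hc, if_pos rfl]
      exact ih g0 i0 (r0 + 1) h1 h2 (by omega)
    · simp only [if_neg hc]
      by_cases hi : i0 < L
      · simp only [if_pos hi]
        refine ih _ (i0 + 1) 0 (by simp [h1]) ?_ le_rfl
        intro a ha
        rcases List.mem_or_eq_of_mem_set ha with h | h
        · exact h2 a h
        · subst h; have := pvGetD_nonneg h2 i0; omega
      · simp only [if_neg hi]
        exact ih g0 (i0 + 1) 0 h1 h2 le_rfl

lemma pvGapPattern_len (L : Nat) (alnBase : List Char) : (pvGapPattern L alnBase).length = L + 1 := by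
  unfold pvGapPattern
  have := pvGapPattern_aux L alnBase (List.replicate (L+1) 0) 0 0 (by simp) (by simp) le_rfl
  simp only at this
  simp only [List.length_set]
  exact this.1


-- A's merge_gap_patterns_max is zipWith max on equal lengths
lemma pvMergeMax_eq (p1 p2 : List Int) (h : p1.length = p2.length) :
    pvMergeMax p1 p2 = List.zipWith max p1 p2 := by
  unfold pvMergeMax
  rw [PySem.List.foldl_append_singleton_eq_map]
  apply List.ext_getElem
  · simp [h, pvZipMax_len]
  · intro i h1 h2
    have hi1 : i < p1.length := by rw [List.length_zipWith] at h2; omega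
    have hi2 : i < p2.length := by rw [List.length_zipWith] at h2; omega
    simp only [List.nil_append, List.getElem_map, List.getElem_range, List.getElem_zipWith]
    rw [List.getD_eq_getElem p1 0 hi1, List.getD_eq_getElem p2 0 hi2]

-- ---------- rows as segments between anchor residues ----------

-- number of non-gap characters of a piece of a row
def pvNd (p : List Char) : Nat := p.countP (fun c => c ≠ '-')

-- canonical assembly of a row from its segments and anchor residues
def pvGAsm : List (List Char) → List Char → List Char
  | [], _ => []
  | [tl], [] => tl
  | _ :: _ :: _, [] => []
  | p :: ps, x :: xs => p ++ x :: pvGAsm ps xs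

-- canonical decomposition of a row at its anchors; j = non-gap chars already consumed
def pvGRec (base : List Char) : List Char → Nat → List (List Char) × List Char
  | [], _ => ([[]], [])
  | ch :: s, j =>
    if ch ≠ '-' ∧ base.getD j ' ' ≠ '-' then
      ([] :: (pvGRec base s (j + 1)).1, ch :: (pvGRec base s (j + 1)).2)
    else
      match pvGRec base s (if ch = '-' then j else j + 1) with
      | (p :: ps, xs) => ((ch :: p) :: ps, xs)
      | ([], xs) => ([], xs)   -- unreachable: the first component is never empty

-- what expand_to_pattern does to the segments: a dash prefix per block, one tail block
def pvPadG (L : Nat) (q : List Int) : List (List Char) → Nat → List (List Char)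
  | [], _ => []
  | [tl], k =>
    [if k < L then
        List.replicate (q.getD k 0).toNat '-' ++ tl ++ List.replicate ((q.drop (k + 1)).sum).toNat '-'
     else List.replicate (q.getD L 0).toNat '-']
  | p :: p2 :: ps, k => (List.replicate (q.getD k 0).toNat '-' ++ p) :: pvPadG L q (p2 :: ps) (k + 1)

-- a segment is valid at offset j: its non-gap chars all sit in gap columns of the centre
def pvFillOK (base : List Char) : List Char → Nat → Prop
  | [], _ => True
  | ch :: p, j => (ch ≠ '-' → base.getD j ' ' = '-') ∧ pvFillOK base p (if ch = '-' then j else j + 1)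

-- a (segments, anchors) decomposition is valid at offset j
def pvValG (base : List Char) : List (List Char) → List Char → Nat → Prop
  | [], _, _ => False
  | [tl], [], j => pvFillOK base tl j
  | [_], _ :: _, _ => False
  | _ :: _ :: _, [], _ => False
  | p :: p2 :: ps, x :: xs, j =>
    pvFillOK base p j ∧ x ≠ '-' ∧ base.getD (j + pvNd p) ' ' ≠ '-' ∧
      pvValG base (p2 :: ps) xs (j + pvNd p + 1)

-- the pairs (row char, reconstructed base char) of an assembled row
def pvGPairs : List (List Char) → List (Char × Char) → List (Char × Char)
  | [], _ => []
  | [tl], [] => tl.map (fun c => (c, '-'))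
  | _ :: _ :: _, [] => []
  | p :: ps, xb :: xbs => p.map (fun c => (c, '-')) ++ xb :: pvGPairs ps xbs

lemma pvNd_append (a b : List Char) : pvNd (a ++ b) = pvNd a + pvNd b := by
  unfold pvNd; rw [List.countP_append]

lemma pvNd_cons (c : Char) (p : List Char) :
    pvNd (c :: p) = (if c = '-' then 0 else 1) + pvNd p := by
  unfold pvNd
  rw [List.countP_cons]
  by_cases hc : c = '-' <;> simp [hc] <;> omega

lemma pvNd_replicate (n : Nat) : pvNd (List.replicate n '-') = 0 := by
  induction n with
  | zero => rfl
  | succ n ih => rw [List.replicate_succ, pvNd_cons]; simpa using ih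

lemma pvFillOK_append (base : List Char) :
    ∀ (a b : List Char) (j : Nat), pvFillOK base a j → pvFillOK base b (j + pvNd a) →
    pvFillOK base (a ++ b) j := by
  intro a
  induction a with
  | nil => intro b j _ hb; simpa [pvNd] using hb
  | cons c a ih =>
    intro b j ha hb
    obtain ⟨h1, h2⟩ := ha
    rw [pvNd_cons] at hb
    refine ⟨h1, ?_⟩
    by_cases hc : c = '-'
    · subst hc
      simp only [reduceIte] at h2 hb ⊢
      exact ih b j h2 (by simpa using hb)
    · simp only [if_neg hc] at h2 hb ⊢
      refine ih b (j + 1) h2 ?_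
      have : j + (1 + pvNd a) = j + 1 + pvNd a := by omega
      rw [this] at hb
      exact hb

lemma pvFillOK_replicate (base : List Char) (n : Nat) (j : Nat) :
    pvFillOK base (List.replicate n '-') j := by
  induction n with
  | zero => trivial
  | succ n ih => exact ⟨by simp, by simpa using ih⟩

-- ---------- pvGRec: shape, reassembly, validity ----------

lemma pvGRec_brk (base : List Char) (ch : Char) (s : List Char) (j : Nat)
    (h : ch ≠ '-' ∧ base.getD j ' ' ≠ '-') :
    pvGRec base (ch :: s) j = ([] :: (pvGRec base s (j + 1)).1, ch :: (pvGRec base s (j + 1)).2) := by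
  simp only [pvGRec]
  rw [if_pos h]

lemma pvGRec_nobrk (base : List Char) (ch : Char) (s : List Char) (j : Nat)
    (h : ¬(ch ≠ '-' ∧ base.getD j ' ' ≠ '-'))
    {p : List Char} {ps : List (List Char)} {xs : List Char}
    (hr : pvGRec base s (if ch = '-' then j else j + 1) = (p :: ps, xs)) :
    pvGRec base (ch :: s) j = ((ch :: p) :: ps, xs) := by
  simp only [pvGRec]
  rw [if_neg h, hr]

lemma pvGRec_cases (base : List Char) : ∀ (s : List Char) (j : Nat),
    ∃ p ps xs, pvGRec base s j = (p :: ps, xs) := by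
  intro s
  induction s with
  | nil => intro j; exact ⟨[], [], [], rfl⟩
  | cons ch s ih =>
    intro j
    by_cases h : ch ≠ '-' ∧ base.getD j ' ' ≠ '-'
    · exact ⟨[], (pvGRec base s (j + 1)).1, ch :: (pvGRec base s (j + 1)).2, pvGRec_brk base ch s j h⟩
    · obtain ⟨p, ps, xs, hr⟩ := ih (if ch = '-' then j else j + 1)
      exact ⟨ch :: p, ps, xs, pvGRec_nobrk base ch s j h hr⟩

lemma pvGRec_len (base : List Char) : ∀ (s : List Char) (j : Nat),
    (pvGRec base s j).1.length = (pvGRec base s j).2.length + 1 := by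
  intro s
  induction s with
  | nil => intro j; simp [pvGRec]
  | cons ch s ih =>
    intro j
    by_cases h : ch ≠ '-' ∧ base.getD j ' ' ≠ '-'
    · rw [pvGRec_brk base ch s j h]
      simpa using ih (j + 1)
    · obtain ⟨p, ps, xs, hr⟩ := pvGRec_cases base s (if ch = '-' then j else j + 1)
      rw [pvGRec_nobrk base ch s j h hr]
      have := ih (if ch = '-' then j else j + 1)
      rw [hr] at this
      simpa using this

lemma pvGRec_anchors_le (base : List Char) : ∀ (s : List Char) (j : Nat),
    (pvGRec base s j).2.length ≤ pvNd s := by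
  intro s
  induction s with
  | nil => intro j; simp [pvGRec, pvNd]
  | cons ch s ih =>
    intro j
    rw [pvNd_cons]
    by_cases h : ch ≠ '-' ∧ base.getD j ' ' ≠ '-'
    · rw [pvGRec_brk base ch s j h]
      have := ih (j + 1)
      simp only [List.length_cons, if_neg h.1]
      omega
    · obtain ⟨p, ps, xs, hr⟩ := pvGRec_cases base s (if ch = '-' then j else j + 1)
      rw [pvGRec_nobrk base ch s j h hr]
      have := ih (if ch = '-' then j else j + 1)
      rw [hr] at this
      simp only at this ⊢
      by_cases hc : ch = '-' <;> simp [hc] <;> omega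

lemma pvGAsm_pvGRec (base : List Char) : ∀ (s : List Char) (j : Nat),
    pvGAsm (pvGRec base s j).1 (pvGRec base s j).2 = s := by
  intro s
  induction s with
  | nil => intro j; simp [pvGRec, pvGAsm]
  | cons ch s ih =>
    intro j
    by_cases h : ch ≠ '-' ∧ base.getD j ' ' ≠ '-'
    · rw [pvGRec_brk base ch s j h]
      obtain ⟨p, ps, xs, hr⟩ := pvGRec_cases base s (j + 1)
      have hih := ih (j + 1)
      rw [hr] at hih ⊢
      simp only [pvGAsm, List.nil_append]
      rw [hih]
    · obtain ⟨p, ps, xs, hr⟩ := pvGRec_cases base s (if ch = '-' then j else j + 1)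
      rw [pvGRec_nobrk base ch s j h hr]
      have hih := ih (if ch = '-' then j else j + 1)
      rw [hr] at hih
      have hlen := pvGRec_len base s (if ch = '-' then j else j + 1)
      rw [hr] at hlen
      simp only [List.length_cons] at hlen
      cases xs with
      | nil =>
        cases ps with
        | cons _ _ => simp at hlen
        | nil =>
          simp only [pvGAsm] at hih ⊢
          rw [hih]
      | cons x xs' =>
        cases ps with
        | nil => simp at hlen
        | cons p2 ps' =>
          simp only [pvGAsm] at hih ⊢
          rw [List.cons_append, hih]

lemma pvValG_consChar (base : List Char) (ch : Char) (j : Nat)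
    (h : ¬(ch ≠ '-' ∧ base.getD j ' ' ≠ '-')) :
    ∀ (xs : List Char) (p : List Char) (ps : List (List Char)),
    pvValG base (p :: ps) xs (if ch = '-' then j else j + 1) →
    pvValG base ((ch :: p) :: ps) xs j := by
  have hfill1 : ch ≠ '-' → base.getD j ' ' = '-' := by
    intro hc
    by_contra hb
    exact h ⟨hc, hb⟩
  intro xs
  cases xs with
  | nil =>
    intro p ps hv
    cases ps with
    | cons _ _ => exact absurd hv (by simp [pvValG])
    | nil => exact ⟨hfill1, hv⟩
  | cons x xs' =>
    intro p ps hv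
    cases ps with
    | nil => exact absurd hv (by simp [pvValG])
    | cons p2 ps' =>
      obtain ⟨h1, h2, h3, h4⟩ := hv
      have hnd : j + pvNd (ch :: p) = (if ch = '-' then j else j + 1) + pvNd p := by
        rw [pvNd_cons]
        by_cases hc : ch = '-' <;> simp [hc] <;> omega
      refine ⟨⟨hfill1, h1⟩, h2, ?_, ?_⟩
      · rw [hnd]; exact h3
      · rw [hnd]; exact h4

lemma pvGRec_valid (base : List Char) : ∀ (s : List Char) (j : Nat),
    pvValG base (pvGRec base s j).1 (pvGRec base s j).2 j := by
  intro s
  induction s with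
  | nil => intro j; simp [pvGRec, pvValG, pvFillOK]
  | cons ch s ih =>
    intro j
    by_cases h : ch ≠ '-' ∧ base.getD j ' ' ≠ '-'
    · rw [pvGRec_brk base ch s j h]
      obtain ⟨p, ps, xs, hr⟩ := pvGRec_cases base s (j + 1)
      have hih := ih (j + 1)
      rw [hr] at hih ⊢
      have hnd0 : pvNd ([] : List Char) = 0 := rfl
      refine ⟨trivial, h.1, ?_, ?_⟩
      · rw [hnd0, Nat.add_zero]; exact h.2
      · rw [hnd0, Nat.add_zero]; exact hih
    · obtain ⟨p, ps, xs, hr⟩ := pvGRec_cases base s (if ch = '-' then j else j + 1)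
      rw [pvGRec_nobrk base ch s j h hr]
      have hih := ih (if ch = '-' then j else j + 1)
      rw [hr] at hih
      exact pvValG_consChar base ch j h xs p ps hih

-- ---------- pvPadG: shape, validity, closed form ----------

lemma pvPadG_len (L : Nat) (q : List Int) : ∀ (ps : List (List Char)) (p0 : List Char) (k : Nat),
    (pvPadG L q (p0 :: ps) k).length = ps.length + 1 := by
  intro ps
  induction ps with
  | nil => intro p0 k; simp [pvPadG]
  | cons p1 ps ih => intro p0 k; simp [pvPadG, ih]

lemma pvPadG_shape (L : Nat) (q : List Int) (ps : List (List Char)) (p0 : List Char) (k : Nat) :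
    ∃ r rs, pvPadG L q (p0 :: ps) k = r :: rs ∧ rs.length = ps.length := by
  cases ps with
  | nil => exact ⟨_, [], rfl, rfl⟩
  | cons p1 ps' => exact ⟨_, _, rfl, pvPadG_len L q ps' p1 (k + 1)⟩

lemma pvFillOK_replApp (base : List Char) (n : Nat) (p : List Char) (j : Nat)
    (h : pvFillOK base p j) : pvFillOK base (List.replicate n '-' ++ p) j := by
  refine pvFillOK_append base _ p j (pvFillOK_replicate base n j) ?_
  rw [pvNd_replicate, Nat.add_zero]
  exact h

lemma pvNd_replApp (n : Nat) (p : List Char) :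
    pvNd (List.replicate n '-' ++ p) = pvNd p := by
  rw [pvNd_append, pvNd_replicate, Nat.zero_add]

lemma pvPadG_valid (base : List Char) (L : Nat) (q : List Int) :
    ∀ (xs : List Char) (ps : List (List Char)) (p0 : List Char) (j k : Nat),
    pvValG base (p0 :: ps) xs j → pvValG base (pvPadG L q (p0 :: ps) k) xs j := by
  intro xs
  induction xs with
  | nil =>
    intro ps p0 j k hv
    cases ps with
    | cons _ _ => exact absurd hv (by simp [pvValG])
    | nil =>
      simp only [pvPadG]
      by_cases hk : k < L
      · rw [if_pos hk]
        simp only [pvValG]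
        refine pvFillOK_append base _ _ j ?_ (pvFillOK_replicate base _ _)
        exact pvFillOK_replApp base _ _ j hv
      · rw [if_neg hk]
        simp only [pvValG]
        exact pvFillOK_replicate base _ _
  | cons x xs' ih =>
    intro ps p0 j k hv
    cases ps with
    | nil => exact absurd hv (by simp [pvValG])
    | cons p2 ps' =>
      obtain ⟨h1, h2, h3, h4⟩ := hv
      simp only [pvPadG]
      obtain ⟨r, rs, hr, _⟩ := pvPadG_shape L q ps' p2 (k + 1)
      rw [hr]
      have hih := ih ps' p2 (j + pvNd p0 + 1) (k + 1) h4
      rw [hr] at hih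
      exact ⟨pvFillOK_replApp base _ _ j h1, h2,
        by rw [pvNd_replApp]; exact h3, by rw [pvNd_replApp]; exact hih⟩

lemma pvPadG_closed (L : Nat) (q : List Int) (hq : q.length = L + 1) :
    ∀ (ps : List (List Char)) (p0 : List Char) (k : Nat), k + ps.length ≤ L →
    pvPadG L q (p0 :: ps) k =
      List.zipWith (fun p g => List.replicate g.toNat '-' ++ p) ((p0 :: ps).take ps.length) (q.drop k) ++
        [if k + ps.length = L then List.replicate (q.getD L 0).toNat '-'
         else List.replicate (q.getD (k + ps.length) 0).toNat '-' ++ (p0 :: ps).getD ps.length [] ++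
           List.replicate ((q.drop (k + ps.length + 1)).sum).toNat '-'] := by
  intro ps
  induction ps with
  | nil =>
    intro p0 k hk
    simp only [pvPadG, List.length_nil, Nat.add_zero, List.take_zero, List.zipWith_nil_left,
      List.nil_append, List.getD_cons_zero]
    by_cases h : k = L
    · simp [h]
    · have hlt : k < L := by omega
      simp [hlt, h]
  | cons p1 ps ih =>
    intro p0 k hk
    simp only [List.length_cons] at hk
    have hkq : k < q.length := by omega
    have hdq : q.drop k = q.getD k 0 :: q.drop (k + 1) := by
      rw [List.drop_eq_getElem_cons hkq, List.getD_eq_getElem q 0 hkq]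
    simp only [pvPadG, List.length_cons, List.take_succ_cons, hdq, List.zipWith_cons_cons,
      List.getD_cons_succ, List.cons_append]
    rw [ih p1 (k + 1) (by omega)]
    have harith : k + (ps.length + 1) = k + 1 + ps.length := by omega
    rw [harith]

lemma pvPadRowG_eq (L : Nat) (q : List Int) (hq : q.length = L + 1)
    (parts : List (List Char)) (chars : List Char)
    (h1 : parts.length = chars.length + 1) (h2 : chars.length ≤ L) :
    pvPadRowG (parts, chars) q L = (pvPadG L q parts 0, chars) := by
  cases parts with
  | nil => simp at h1
  | cons p0 ps =>
    have hps : ps.length = chars.length := by simpa using h1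
    unfold pvPadRowG
    simp only []
    rw [pvPadG_closed L q hq ps p0 0 (by omega)]
    rw [Prod.mk.injEq]
    refine ⟨?_, rfl⟩
    rw [← hps]
    simp only [Nat.zero_add, List.drop_zero]

-- ---------- rendering ----------
lemma pvLastD_indep' {α : Type} (t : List α) : ∀ (a b c : α), (a :: t).getLastD b = (a :: t).getLastD c := by
  induction t with
  | nil => intro a b c; rfl
  | cons x t ih => intro a b c; exact ih x a a

lemma pvRenderRowG_asm : ∀ (chars : List Char) (parts : List (List Char)),
    parts.length = chars.length + 1 → pvRenderRowG (parts, chars) = pvGAsm parts chars := by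
  intro chars
  induction chars with
  | nil =>
    intro parts h
    cases parts with
    | nil => simp at h
    | cons tl ps =>
      cases ps with
      | cons _ _ => simp at h
      | nil => simp [pvRenderRowG, pvGAsm]
  | cons x xs ih =>
    intro parts h
    cases parts with
    | nil => simp at h
    | cons p ps =>
      cases ps with
      | nil => simp at h
      | cons p2 ps' =>
        have hih := ih (p2 :: ps') (by simpa using h)
        unfold pvRenderRowG at hih ⊢
        simp only [List.zipWith_cons_cons, List.flatten_cons, pvGAsm]
        have hlast : (p :: p2 :: ps').getLastD [] = (p2 :: ps').getLastD [] := by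
          rw [List.getLastD_cons]
          exact pvLastD_indep' ps' p2 p []
        rw [hlast]
        simp only [List.append_assoc, List.cons_append]
        rw [← hih]
        simp

-- ---------- the split_row fold computes pvGRec ----------

lemma pvDropLastLastG {α : Type} (l : List α) (dflt : α) :
    ∀ d : α, (d :: l).dropLast ++ [(d :: l).getLastD dflt] = d :: l := by
  induction l with
  | nil => intro d; rfl
  | cons a t ih =>
    intro d
    have h1 : (d :: a :: t).dropLast = d :: (a :: t).dropLast := rfl
    have h2 : (d :: a :: t).getLastD dflt = (a :: t).getLastD d := rfl
    rw [h1, h2, pvLastD_indep' t a d dflt]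
    simpa using ih a

lemma pvFoldSplit (base : List Char) : ∀ (s : List Char)
    (done : List (List Char)) (cur : List Char) (anchors : List Char) (k : Nat),
    (s.foldl (fun (st : List (List Char) × List Char × List Char × Nat) ch =>
      if ch ≠ '-' ∧ base.getD st.2.2.2 ' ' ≠ '-' then
        (st.1 ++ [st.2.1], [], st.2.2.1 ++ [ch], st.2.2.2 + 1)
      else
        (st.1, st.2.1 ++ [ch], st.2.2.1, if ch = '-' then st.2.2.2 else st.2.2.2 + 1))
      (done, cur, anchors, k)) =
    (done ++ (((cur ++ (pvGRec base s k).1.headD []) :: (pvGRec base s k).1.tail).dropLast),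
     ((cur ++ (pvGRec base s k).1.headD []) :: (pvGRec base s k).1.tail).getLastD [],
     anchors ++ (pvGRec base s k).2, k + pvNd s) := by
  intro s
  induction s with
  | nil => intro done cur anchors k; simp [pvGRec, pvNd]
  | cons ch s ih =>
    intro done cur anchors k
    rw [pvNd_cons]
    by_cases h : ch ≠ '-' ∧ base.getD k ' ' ≠ '-'
    · rw [List.foldl_cons, if_pos h, pvGRec_brk base ch s k h]
      rw [ih (done ++ [cur]) [] (anchors ++ [ch]) (k + 1)]
      obtain ⟨g0, gs, xs, hr⟩ := pvGRec_cases base s (k + 1)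
      rw [hr]
      simp only [List.headD_cons, List.tail_cons, List.nil_append, List.append_nil]
      refine Prod.ext ?_ (Prod.ext ?_ (Prod.ext ?_ ?_))
      · simp only []
        simp [List.dropLast_cons₂, List.append_assoc]
      · simp only []
        simp [List.getLastD_cons]
      · simp
      · simp only [if_neg h.1]
        omega
    · rw [List.foldl_cons, if_neg h]
      obtain ⟨p, ps, xs, hr⟩ := pvGRec_cases base s (if ch = '-' then k else k + 1)
      rw [pvGRec_nobrk base ch s k h hr]
      have hih := ih done (cur ++ [ch]) anchors (if ch = '-' then k else k + 1)
      rw [hr] at hih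
      simp only [List.headD_cons, List.tail_cons] at hih ⊢
      rw [hih]
      refine Prod.ext ?_ (Prod.ext ?_ (Prod.ext ?_ ?_))
      · simp [List.append_assoc]
      · simp only []
        congr 1
        simp [List.append_assoc]
      · rfl
      · simp only []
        by_cases hc : ch = '-' <;> simp [hc] <;> omega

lemma pvSplitRow_eq (base s : List Char) :
    pvSplitRow s base = ((pvGRec base s 0).1, (pvGRec base s 0).2) := by
  obtain ⟨p, ps, xs, hr⟩ := pvGRec_cases base s 0
  unfold pvSplitRow
  rw [pvFoldSplit base s [] [] [] 0, hr]
  simp only [List.headD_cons, List.tail_cons, List.nil_append]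
  rw [Prod.mk.injEq]
  exact ⟨pvDropLastLastG ps [] p, rfl⟩

-- ---------- expand_to_pattern on an assembled row ----------
lemma pvCb_nil : pvCopyBlock [] = ([], []) := rfl

lemma pvCb_break (x b : Char) (rest : List (Char × Char)) (hb : b ≠ '-') :
    pvCopyBlock ((x, b) :: rest) = ([x], rest) := by
  simp [pvCopyBlock, hb]


-- sum over an index range of getD entries
lemma pvDropSum_step (q : List Int) (j : Nat) (hj : j < q.length) :
    (q.drop j).sum = q.getD j 0 + (q.drop (j + 1)).sum := by
  rw [List.drop_eq_getElem_cons hj, List.sum_cons, List.getD_eq_getElem q 0 hj]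

-- fold of the expand loop over exhausted pairs: just the remaining gap blocks
lemma pvEmptyFold (q : List Int) : ∀ (m j : Nat) (out : List Char),
    ((List.range' j m).foldl (fun (st : List Char × List (Char × Char)) k =>
        (st.1 ++ List.replicate (q.getD k 0).toNat '-' ++ (pvCopyBlock st.2).1, (pvCopyBlock st.2).2))
      (out, [])) =
      (out ++ ((List.range' j m).map (fun i => List.replicate (q.getD i 0).toNat '-')).flatten, []) := by
  intro m
  induction m with
  | zero => intro j out; simp
  | succ m ih =>
    intro j out
    rw [List.range'_succ]
    simp only [List.foldl_cons, List.map_cons, List.flatten_cons, pvCb_nil]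
    rw [ih (j + 1) _]
    simp

lemma pvFlattenRepl (q : List Int) (hq : ∀ a ∈ q, 0 ≤ a) : ∀ (m j : Nat), j + m ≤ q.length →
    ((List.range' j m).map (fun i => List.replicate (q.getD i 0).toNat '-')).flatten =
      List.replicate (((List.range' j m).map (fun i => q.getD i 0)).sum).toNat '-' := by
  intro m
  induction m with
  | zero => intro j _; simp
  | succ m ih =>
    intro j hm
    rw [List.range'_succ]
    simp only [List.map_cons, List.flatten_cons, List.sum_cons]
    rw [ih (j + 1) (by omega)]
    rw [pvReplApp _ _ (pvGetD_nonneg hq j) ?_]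
    · apply pvSum_nonneg
      intro a ha
      simp only [List.mem_map] at ha
      obtain ⟨i, _, rfl⟩ := ha
      exact pvGetD_nonneg hq i

lemma pvRangeSum (q : List Int) (L : Nat) (hq : q.length = L + 1) : ∀ (m j : Nat), j + m = L →
    (q.drop j).sum = ((List.range' j m).map (fun i => q.getD i 0)).sum + q.getD L 0 := by
  intro m
  induction m with
  | zero =>
    intro j hj
    subst hj
    rw [pvDropSum_step q j (by omega)]
    have : q.drop (j + 1) = [] := List.drop_eq_nil_of_le (by omega)
    simp [this]
  | succ m ih =>
    intro j hj
    rw [pvDropSum_step q j (by omega), List.range'_succ]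
    simp only [List.map_cons, List.sum_cons]
    rw [ih (j + 1) (by omega)]
    ring


-- ---------- the aligned sequence carries at most |b| residues ----------

lemma pvNwInner_acc (ai : Char) (m mm g : Int) : ∀ (bs : List Char) (prev : List Int) (left : Int)
    (accS accT : List Int), ∃ sOut tOut,
    pvNwInner ai m mm g bs prev left accS accT = (accS ++ sOut, accT ++ tOut) := by
  intro bs
  induction bs with
  | nil => intro prev left accS accT; exact ⟨[], [], by simp [pvNwInner]⟩
  | cons bj bs ih =>
    intro prev left accS accT
    simp only [pvNwInner]
    by_cases h1 : prev.headD 0 + (if ai == bj then m else mm) ≥ (prev.drop 1).headD 0 + g ∧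
        prev.headD 0 + (if ai == bj then m else mm) ≥ left + g
    · rw [if_pos h1]
      obtain ⟨so, tAcc, hso⟩ := ih (prev.drop 1) (prev.headD 0 + (if ai == bj then m else mm))
        (accS ++ [prev.headD 0 + (if ai == bj then m else mm)]) (accT ++ [1])
      exact ⟨[prev.headD 0 + (if ai == bj then m else mm)] ++ so, [1] ++ tAcc, by rw [hso]; simp⟩
    · rw [if_neg h1]
      by_cases h2 : (prev.drop 1).headD 0 + g ≥ left + g
      · rw [if_pos h2]
        obtain ⟨so, tAcc, hso⟩ := ih (prev.drop 1) ((prev.drop 1).headD 0 + g)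
          (accS ++ [(prev.drop 1).headD 0 + g]) (accT ++ [2])
        exact ⟨[(prev.drop 1).headD 0 + g] ++ so, [2] ++ tAcc, by rw [hso]; simp⟩
      · rw [if_neg h2]
        obtain ⟨so, tAcc, hso⟩ := ih (prev.drop 1) (left + g)
          (accS ++ [left + g]) (accT ++ [3])
        exact ⟨[left + g] ++ so, [3] ++ tAcc, by rw [hso]; simp⟩

lemma pvNwRows_len (bs : List Char) (m mm g : Int) : ∀ (as_ : List Char) (i : Nat) (prevS : List Int),
    (pvNwRows bs m mm g as_ i prevS).2.length = as_.length := by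
  intro as_
  induction as_ with
  | nil => intro i prevS; simp [pvNwRows]
  | cons ai rest ih => intro i prevS; simp [pvNwRows, ih]

lemma pvNwRows_head2 (bs : List Char) (m mm g : Int) : ∀ (as_ : List Char) (i : Nat) (prevS : List Int),
    ∀ r ∈ (pvNwRows bs m mm g as_ i prevS).2, r.getD 0 0 = 2 := by
  intro as_
  induction as_ with
  | nil => intro i prevS r hr; simp [pvNwRows] at hr
  | cons ai rest ih =>
    intro i prevS r hr
    simp only [pvNwRows, List.mem_cons] at hr
    rcases hr with rfl | hr
    · obtain ⟨so, tAcc, hso⟩ := pvNwInner_acc ai m mm g bs prevS ((i : Int) * g) [(i : Int) * g] [2]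
      rw [hso]
      simp
    · exact ih (i + 1) _ r hr

lemma pvCountP_append_singleton (l : List Char) (c : Char) :
    (l ++ [c]).countP (fun c => c ≠ '-') ≤ l.countP (fun c => c ≠ '-') + 1 := by
  rw [List.countP_append]
  have : List.countP (fun c => decide (c ≠ '-')) [c] ≤ 1 := by
    by_cases hc : c = '-' <;> simp [List.countP_cons, hc]
  omega

lemma pvCountP_append_dash (l : List Char) :
    (l ++ ['-']).countP (fun c => c ≠ '-') = l.countP (fun c => c ≠ '-') := by
  rw [List.countP_append]
  simp

lemma pvTb_count (a b : List Char) (tr : List (List Int))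
    (H2 : ∀ i, 1 ≤ i → i ≤ a.length → (tr.getD i []).getD 0 0 = 2) :
    ∀ (fuel : Nat) (i j : Nat) (accA accB : List Char), i ≤ a.length → j ≤ b.length →
    ((pvTbLoop a b tr fuel i j accA accB).2.countP (fun c => c ≠ '-')) ≤
      accB.countP (fun c => c ≠ '-') + j := by
  intro fuel
  induction fuel with
  | zero => intro i j accA accB _ _; simp [pvTbLoop]
  | succ fuel ih =>
    intro i j accA accB hi hj
    simp only [pvTbLoop]
    by_cases h0 : i = 0 ∧ j = 0
    · rw [if_pos h0]; simp
    · rw [if_neg h0]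
      by_cases ht1 : (tr.getD i []).getD j 0 = 1
      · rw [if_pos ht1]
        have hj1 : 1 ≤ j := by
          by_contra hc
          have hj0 : j = 0 := by omega
          have hi1 : 1 ≤ i := by omega
          have := H2 i hi1 hi
          rw [hj0] at ht1
          omega
        calc ((pvTbLoop a b tr fuel (i-1) (j-1) (accA ++ [a.getD (i-1) ' ']) (accB ++ [b.getD (j-1) ' '])).2.countP (fun c => c ≠ '-'))
            ≤ (accB ++ [b.getD (j-1) ' ']).countP (fun c => c ≠ '-') + (j - 1) :=
              ih (i-1) (j-1) (accA ++ [a.getD (i-1) ' ']) (accB ++ [b.getD (j-1) ' ']) (by omega) (by omega)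
          _ ≤ accB.countP (fun c => c ≠ '-') + 1 + (j - 1) := by
              have := pvCountP_append_singleton accB (b.getD (j-1) ' '); omega
          _ ≤ accB.countP (fun c => c ≠ '-') + j := by omega
      · rw [if_neg ht1]
        by_cases ht2 : (tr.getD i []).getD j 0 = 2
        · rw [if_pos ht2]
          have := ih (i-1) j (accA ++ [a.getD (i-1) ' ']) (accB ++ ['-']) (by omega) hj
          rw [pvCountP_append_dash accB] at this
          exact this
        · rw [if_neg ht2]
          have hj1 : 1 ≤ j := by
            by_contra hc
            have hj0 : j = 0 := by omega
            have hi1 : 1 ≤ i := by omega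
            have := H2 i hi1 hi
            rw [hj0] at ht2
            omega
          calc ((pvTbLoop a b tr fuel i (j-1) (accA ++ ['-']) (accB ++ [b.getD (j-1) ' '])).2.countP (fun c => c ≠ '-'))
              ≤ (accB ++ [b.getD (j-1) ' ']).countP (fun c => c ≠ '-') + (j - 1) :=
                ih i (j-1) (accA ++ ['-']) (accB ++ [b.getD (j-1) ' ']) hi (by omega)
            _ ≤ accB.countP (fun c => c ≠ '-') + 1 + (j - 1) := by
                have := pvCountP_append_singleton accB (b.getD (j-1) ' '); omega
            _ ≤ accB.countP (fun c => c ≠ '-') + j := by omega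

lemma pvNw_cnt (a b : List Char) (m mm g : Int) :
    ((pvNwAlign a b m mm g).2).countP (fun c => c ≠ '-') ≤ b.length := by
  unfold pvNwAlign
  simp only []
  rw [List.countP_reverse]
  have H2 : ∀ i, 1 ≤ i → i ≤ a.length →
      (((0 :: List.replicate b.length 3 : List Int) ::
        (pvNwRows b m mm g a 1 ((List.range (b.length + 1)).map (fun j => (j : Int) * g))).2).getD i []).getD 0 0 = 2 := by
    intro i hi1 hi2
    obtain ⟨i', rfl⟩ : ∃ i', i = i' + 1 := ⟨i - 1, by omega⟩
    rw [List.getD_cons_succ]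
    apply pvNwRows_head2
    have hlen : (pvNwRows b m mm g a 1 ((List.range (b.length + 1)).map (fun j => (j : Int) * g))).2.length = a.length :=
      pvNwRows_len b m mm g a 1 _
    rw [List.getD_eq_getElem _ [] (by omega)]
    exact List.getElem_mem _
  have := pvTb_count a b _ H2 (a.length + b.length) a.length b.length [] [] le_rfl le_rfl
  simpa using this


lemma pvCbFiller : ∀ (p : List Char) (rest : List (Char × Char)),
    pvCopyBlock (p.map (fun c => (c, '-')) ++ rest) =
      (p ++ (pvCopyBlock rest).1, (pvCopyBlock rest).2) := by
  intro p
  induction p with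
  | nil => intro rest; simp
  | cons c p ih => intro rest; simp [pvCopyBlock, ih]

-- the reconstruction fold of expand_to_pattern over a valid segment: all dashes
lemma pvRecFill (base : List Char) : ∀ (p : List Char) (acc : List Char) (j : Nat),
    pvFillOK base p j →
    (p.foldl (fun (st : List Char × Nat) ch =>
        if ch = '-' then (st.1 ++ ['-'], st.2)
        else (st.1 ++ [base.getD st.2 ' '], st.2 + 1)) (acc, j)) =
      (acc ++ List.replicate p.length '-', j + pvNd p) := by
  intro p
  induction p with
  | nil => intro acc j _; simp [pvNd]
  | cons c p ih =>
    intro acc j hok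
    obtain ⟨h1, h2⟩ := hok
    rw [List.foldl_cons, pvNd_cons]
    by_cases hc : c = '-'
    · subst hc
      simp only [reduceIte] at h2 ⊢
      rw [ih (acc ++ ['-']) j h2]
      simp [List.replicate_succ]
    · simp only [if_neg hc] at h2 ⊢
      rw [ih (acc ++ [base.getD j ' ']) (j + 1) h2, h1 hc]
      refine Prod.ext ?_ ?_
      · simp [List.replicate_succ]
      · simp only []
        omega

-- the reconstruction fold on an assembled row: dashes on segments, the anchors' base columns
lemma pvRecG (base : List Char) : ∀ (chars : List Char) (parts : List (List Char)) (acc : List Char) (j : Nat),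
    pvValG base parts chars j →
    ∃ bcs : List Char, bcs.length = chars.length ∧ (∀ b ∈ bcs, b ≠ '-') ∧
    ((pvGAsm parts chars).foldl (fun (st : List Char × Nat) ch =>
        if ch = '-' then (st.1 ++ ['-'], st.2)
        else (st.1 ++ [base.getD st.2 ' '], st.2 + 1)) (acc, j)) =
      (acc ++ pvGAsm (parts.map (fun p => List.replicate p.length '-')) bcs,
       j + pvNd (pvGAsm parts chars)) := by
  intro chars
  induction chars with
  | nil =>
    intro parts acc j hv
    cases parts with
    | nil => exact absurd hv (by simp [pvValG])
    | cons tl ps =>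
      cases ps with
      | cons _ _ => exact absurd hv (by simp [pvValG])
      | nil =>
        refine ⟨[], rfl, by simp, ?_⟩
        simp only [pvGAsm, List.map_cons, List.map_nil]
        exact pvRecFill base tl acc j hv
  | cons x xs ih =>
    intro parts acc j hv
    cases parts with
    | nil => exact absurd hv (by simp [pvValG])
    | cons p ps =>
      cases ps with
      | nil => exact absurd hv (by simp [pvValG])
      | cons p2 ps' =>
        obtain ⟨hfill, hx, hb, hrest⟩ := hv
        obtain ⟨bcs, hl, hnd, hfold⟩ := ih (p2 :: ps') (acc ++ List.replicate p.length '-' ++ [base.getD (j + pvNd p) ' ']) (j + pvNd p + 1) hrest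
        refine ⟨base.getD (j + pvNd p) ' ' :: bcs, by simp [hl], ?_, ?_⟩
        · intro b hbm
          rcases List.mem_cons.mp hbm with rfl | hbm
          · exact hb
          · exact hnd b hbm
        · simp only [pvGAsm, List.map_cons]
          rw [List.foldl_append, pvRecFill base p acc j hfill, List.foldl_cons, if_neg hx, hfold]
          refine Prod.ext ?_ ?_
          · simp [List.append_assoc]
          · simp only []
            rw [pvNd_append, pvNd_cons, if_neg hx]
            omega

lemma pvZipRepl (tl : List Char) :
    tl.zip (List.replicate tl.length '-') = tl.map (fun c => (c, '-')) := by
  induction tl with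
  | nil => rfl
  | cons c tl ih => simp [List.replicate_succ, ih]

lemma pvZipAsmG : ∀ (chars bcs : List Char) (parts : List (List Char)),
    parts.length = chars.length + 1 → chars.length = bcs.length →
    (pvGAsm parts chars).zip (pvGAsm (parts.map (fun p => List.replicate p.length '-')) bcs) =
      pvGPairs parts (chars.zip bcs) := by
  intro chars
  induction chars with
  | nil =>
    intro bcs parts h1 h2
    cases bcs with
    | cons _ _ => simp at h2
    | nil =>
      cases parts with
      | nil => simp at h1
      | cons tl ps =>
        cases ps with
        | cons _ _ => simp at h1
        | nil => simp only [pvGAsm, pvGPairs, List.map_cons, List.map_nil, List.zip_nil_right]; exact pvZipRepl tl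
  | cons x xs ih =>
    intro bcs parts h1 h2
    cases bcs with
    | nil => simp at h2
    | cons bc bcs =>
      cases parts with
      | nil => simp at h1
      | cons p ps =>
        cases ps with
        | nil => simp at h1
        | cons p2 ps' =>
          simp only [pvGAsm, pvGPairs, List.map_cons, List.zip_cons_cons]
          rw [List.zip_append (by simp)]
          rw [pvZipRepl p]
          simp only [List.zip_cons_cons]
          have hih := ih bcs (p2 :: ps') (by simpa using h1) (by simpa using h2)
          simp only [List.map_cons] at hih
          rw [hih]

-- the main loop of expand_to_pattern on an assembled row: one pvPadG application
lemma pvExpandFoldG (L : Nat) (q : List Int)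
    (hq : q.length = L + 1) (hqn : ∀ a ∈ q, 0 ≤ a) :
    ∀ (chars bcs : List Char) (parts : List (List Char)) (k : Nat) (out : List Char),
    parts.length = chars.length + 1 → chars.length = bcs.length → (∀ b ∈ bcs, b ≠ '-') →
    k + chars.length ≤ L →
    (((List.range' k (L - k)).foldl (fun (st : List Char × List (Char × Char)) kk =>
        (st.1 ++ List.replicate (q.getD kk 0).toNat '-' ++ (pvCopyBlock st.2).1, (pvCopyBlock st.2).2))
      (out, pvGPairs parts (chars.zip bcs))).1) ++ List.replicate (q.getD L 0).toNat '-'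
      = out ++ pvGAsm (pvPadG L q parts k) chars := by
  intro chars
  induction chars with
  | nil =>
    intro bcs parts k out h1 hbx _ hk
    cases parts with
    | nil => simp at h1
    | cons tl ps =>
      cases ps with
      | cons _ _ => simp at h1
      | nil =>
        cases bcs with
        | cons _ _ => simp at hbx
        | nil =>
          simp only [List.length_nil, Nat.add_zero] at hk
          by_cases hkL : k < L
          · have hspl : L - k = (L - (k + 1)) + 1 := by omega
            rw [hspl, List.range'_succ, List.foldl_cons]
            simp only [pvGPairs, List.zip_nil_right]
            have hcb := pvCbFiller tl []
            simp only [List.append_nil, pvCb_nil] at hcb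
            rw [hcb]
            simp only []
            rw [pvEmptyFold q (L - (k + 1)) (k + 1) _]
            simp only [pvPadG, if_pos hkL, pvGAsm]
            rw [pvFlattenRepl q hqn (L - (k + 1)) (k + 1) (by omega)]
            have hsum := pvRangeSum q L hq (L - (k + 1)) (k + 1) (by omega)
            have e3 : 0 ≤ ((List.range' (k+1) (L - (k+1))).map (fun i => q.getD i 0)).sum := by
              apply pvSum_nonneg
              intro a ha
              simp only [List.mem_map] at ha
              obtain ⟨i, _, rfl⟩ := ha
              exact pvGetD_nonneg hqn i
            have e4 : 0 ≤ q.getD L 0 := pvGetD_nonneg hqn L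
            have harith : ((q.drop (k + 1)).sum).toNat =
                (((List.range' (k+1) (L - (k+1))).map (fun i => q.getD i 0)).sum).toNat +
                  (q.getD L 0).toNat := by
              rw [hsum]; omega
            rw [harith, List.replicate_add]
            simp [List.append_assoc]
          · have hkEq : k = L := by omega
            rw [hkEq]
            simp only [Nat.sub_self, List.range'_zero, List.foldl_nil]
            simp [pvPadG, pvGAsm, hkEq]
  | cons x xs ih =>
    intro bcs parts k out h1 hbx hbnd hk
    cases parts with
    | nil => simp at h1
    | cons p ps =>
      cases bcs with
      | nil => simp at hbx
      | cons bc bcs' =>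
        have hkL : k < L := by simp at hk; omega
        have hspl : L - k = (L - (k + 1)) + 1 := by omega
        rw [hspl, List.range'_succ, List.foldl_cons]
        simp only [List.zip_cons_cons, pvGPairs]
        cases ps with
        | nil => simp at h1
        | cons p2 ps' =>
          rw [pvCbFiller p ((x, bc) :: pvGPairs (p2 :: ps') (xs.zip bcs'))]
          rw [pvCb_break x bc _ (hbnd bc (by simp))]
          simp only []
          rw [ih bcs' (p2 :: ps') (k + 1) _ (by simpa using h1)
              (by simpa using hbx) (fun b hb => hbnd b (by simp [hb])) (by simp at hk ⊢; omega)]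
          simp only [pvPadG, pvGAsm]
          simp only [List.append_assoc, List.cons_append, List.nil_append]

-- expand_to_pattern acts on an assembled row as pvPadG on its segments
lemma pvExpandAsmG (base : List Char)
    (parts : List (List Char)) (chars : List Char)
    (hv : pvValG base parts chars 0)
    (h1 : parts.length = chars.length + 1) (h2 : chars.length ≤ base.length)
    (q : List Int) (hq : q.length = base.length + 1) (hqn : ∀ a ∈ q, 0 ≤ a) :
    pvExpand base (pvGAsm parts chars) q = pvGAsm (pvPadG base.length q parts 0) chars := by
  obtain ⟨bcs, hl, hnd, hfold⟩ := pvRecG base chars parts [] 0 hv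
  unfold pvExpand
  simp only []
  rw [hfold]
  simp only [List.nil_append]
  rw [pvZipAsmG chars bcs parts h1 hl.symm]
  rw [List.range_eq_range']
  have := pvExpandFoldG base.length q hq hqn chars bcs parts 0 [] h1 hl.symm hnd (by omega)
  simp only [Nat.sub_zero, List.nil_append] at this
  exact this

-- ---------- characterizing the two main loops ----------

def pvPat (base : List Char) (m mm g : Int) (e : String × List Char) : List Int :=
  pvGapPattern base.length (pvNwAlign base e.2 m mm g).1

def pvAln (base : List Char) (m mm g : Int) (e : String × List Char) : List Char :=
  (pvNwAlign base e.2 m mm g).2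

-- the cumulative-max sequence of patterns starting from master gaps mg
def pvMList (mg : List Int) : List (List Int) → List (List Int)
  | [] => []
  | p :: ps => List.zipWith max mg p :: pvMList (List.zipWith max mg p) ps

-- the rows produced by A's loop for the entries themselves (prev rows handled separately)
def pvNews (base : List Char) (m mm g : Int) (mg : List Int) : List (String × List Char) → List (List Char)
  | [] => []
  | e :: es =>
    pvGAsm (List.foldl (fun pp qq => pvPadG base.length qq pp 0)
            (pvGRec base (pvAln base m mm g e) 0).1
            (pvMList mg (pvPat base m mm g e :: es.map (pvPat base m mm g))))
          (pvGRec base (pvAln base m mm g e) 0).2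
      :: pvNews base m mm g (List.zipWith max mg (pvPat base m mm g e)) es

-- the same rows as (segments, anchors) pairs: what B's loop produces
def pvNewsB (base : List Char) (m mm g : Int) (mg : List Int) : List (String × List Char) → List (List (List Char) × List Char)
  | [] => []
  | e :: es =>
    (List.foldl (fun pp qq => pvPadG base.length qq pp 0)
        (pvGRec base (pvAln base m mm g e) 0).1
        (pvMList mg (pvPat base m mm g e :: es.map (pvPat base m mm g))),
     (pvGRec base (pvAln base m mm g e) 0).2)
      :: pvNewsB base m mm g (List.zipWith max mg (pvPat base m mm g e)) es

lemma pvNews_eq (base : List Char) (m mm g : Int) :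
    ∀ (es : List (String × List Char)) (mg : List Int),
    pvNews base m mm g mg es = (pvNewsB base m mm g mg es).map (fun p => pvGAsm p.1 p.2) := by
  intro es
  induction es with
  | nil => intro mg; rfl
  | cons e es ih =>
    intro mg
    simp only [pvNews, pvNewsB, List.map_cons]
    rw [ih]

lemma pvChainShape (L : Nat) : ∀ (qs : List (List Int)) (ps : List (List Char)) (p0 : List Char),
    ∃ r rs, List.foldl (fun pp qq => pvPadG L qq pp 0) (p0 :: ps) qs = r :: rs ∧ rs.length = ps.length := by
  intro qs
  induction qs with
  | nil => intro ps p0; exact ⟨p0, ps, rfl, rfl⟩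
  | cons q qs ih =>
    intro ps p0
    obtain ⟨r, rs, hr, hlen⟩ := pvPadG_shape L q ps p0 0
    rw [List.foldl_cons, hr]
    obtain ⟨r', rs', hr', hlen'⟩ := ih rs r
    exact ⟨r', rs', hr', by omega⟩

lemma pvNewsB_valid (base : List Char) (m mm g : Int) :
    ∀ (es : List (String × List Char)) (mg : List Int),
    (∀ e ∈ es, pvNd (pvAln base m mm g e) ≤ base.length) →
    ∀ p ∈ pvNewsB base m mm g mg es, p.1.length = p.2.length + 1 ∧ p.2.length ≤ base.length := by
  intro es
  induction es with
  | nil => intro mg _ p hp; simp [pvNewsB] at hp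
  | cons e es ih =>
    intro mg hcnt p hp
    simp only [pvNewsB, List.mem_cons] at hp
    rcases hp with rfl | hp
    · obtain ⟨p0, ps, xs, hdr⟩ := pvGRec_cases base (pvAln base m mm g e) 0
      have hlen := pvGRec_len base (pvAln base m mm g e) 0
      rw [hdr] at hlen
      simp only [hdr]
      obtain ⟨r, rs, hr, hrs⟩ := pvChainShape base.length
        (pvMList mg (pvPat base m mm g e :: es.map (pvPat base m mm g))) ps p0
      rw [hr]
      constructor
      · simp only [List.length_cons]
        simp at hlen
        omega
      · have h1 := pvGRec_anchors_le base (pvAln base m mm g e) 0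
        rw [hdr] at h1
        simp only at h1
        exact le_trans h1 (hcnt e (by simp))
    · exact ih _ (fun e' he' => hcnt e' (by simp [he'])) p hp

-- A's loop, characterized
lemma pvFoldA (base : List Char) (m mm g : Int) :
    ∀ (es : List (String × List Char)) (mg : List Int) (hs0 : List String)
      (prev : List (List (List Char) × List Char)),
    mg.length = base.length + 1 → (∀ a ∈ mg, 0 ≤ a) →
    (∀ p ∈ prev, pvValG base p.1 p.2 0 ∧ p.1.length = p.2.length + 1 ∧ p.2.length ≤ base.length) →
    (∀ e ∈ es, pvNd (pvAln base m mm g e) ≤ base.length) →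
    es.foldl (fun (st : List Int × List String × List (List Char)) e =>
        (pvMergeMax st.1 (pvGapPattern base.length (pvNwAlign base e.2 m mm g).1),
         st.2.1 ++ [e.1],
         st.2.2.map (fun sp => pvExpand base sp
             (pvMergeMax st.1 (pvGapPattern base.length (pvNwAlign base e.2 m mm g).1))) ++
           [pvExpand base (pvNwAlign base e.2 m mm g).2
             (pvMergeMax st.1 (pvGapPattern base.length (pvNwAlign base e.2 m mm g).1))]))
      (mg, hs0, prev.map (fun p => pvGAsm p.1 p.2)) =
    (List.foldl (fun acc p => List.zipWith max acc p) mg (es.map (pvPat base m mm g)),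
     hs0 ++ es.map Prod.fst,
     prev.map (fun p => pvGAsm (List.foldl (fun pp qq => pvPadG base.length qq pp 0) p.1
        (pvMList mg (es.map (pvPat base m mm g)))) p.2)
       ++ pvNews base m mm g mg es) := by
  intro es
  induction es with
  | nil =>
    intro mg hs0 prev _ _ _ _
    simp [pvNews, pvMList]
  | cons e es ih =>
    intro mg hs0 prev hmg hmgn hprev hcnt
    rw [List.foldl_cons]
    simp only []
    have hpatlen : (pvPat base m mm g e).length = base.length + 1 := pvGapPattern_len _ _
    have hmerge : pvMergeMax mg (pvGapPattern base.length (pvNwAlign base e.2 m mm g).1) =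
        List.zipWith max mg (pvPat base m mm g e) :=
      pvMergeMax_eq _ _ (by rw [hmg]; exact hpatlen.symm)
    have hmlen : (List.zipWith max mg (pvPat base m mm g e)).length = base.length + 1 := by
      rw [pvZipMax_len, hmg, hpatlen]; simp
    have hmnn : ∀ a ∈ List.zipWith max mg (pvPat base m mm g e), 0 ≤ a :=
      pvZipMax_nonneg mg (pvPat base m mm g e) hmgn
    have hmap : (prev.map (fun p => pvGAsm p.1 p.2)).map (fun sp => pvExpand base sp
          (pvMergeMax mg (pvGapPattern base.length (pvNwAlign base e.2 m mm g).1))) =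
        (prev.map (fun p => (pvPadG base.length (List.zipWith max mg (pvPat base m mm g e)) p.1 0, p.2))).map
          (fun p => pvGAsm p.1 p.2) := by
      rw [List.map_map, List.map_map]
      apply List.map_congr_left
      intro p hp
      simp only [Function.comp]
      rw [hmerge]
      obtain ⟨hv, hl1, hl2⟩ := hprev p hp
      exact pvExpandAsmG base p.1 p.2 hv hl1 hl2 _ hmlen hmnn
    have hnewAsm : (pvNwAlign base e.2 m mm g).2 =
        pvGAsm (pvGRec base (pvAln base m mm g e) 0).1 (pvGRec base (pvAln base m mm g e) 0).2 :=
      (pvGAsm_pvGRec base _ 0).symm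
    have hvnew : pvValG base (pvGRec base (pvAln base m mm g e) 0).1 (pvGRec base (pvAln base m mm g e) 0).2 0 :=
      pvGRec_valid base _ 0
    have hlnew := pvGRec_len base (pvAln base m mm g e) 0
    have hcnew : (pvGRec base (pvAln base m mm g e) 0).2.length ≤ base.length :=
      le_trans (pvGRec_anchors_le base _ 0) (hcnt e (by simp))
    have hnew : pvExpand base (pvNwAlign base e.2 m mm g).2
          (pvMergeMax mg (pvGapPattern base.length (pvNwAlign base e.2 m mm g).1)) =
        pvGAsm (pvPadG base.length (List.zipWith max mg (pvPat base m mm g e)) (pvGRec base (pvAln base m mm g e) 0).1 0)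
          (pvGRec base (pvAln base m mm g e) 0).2 := by
      conv_lhs => rw [hnewAsm, hmerge]
      exact pvExpandAsmG base _ _ hvnew hlnew hcnew _ hmlen hmnn
    rw [hmap, hnew, hmerge]
    have hsingle : (prev.map (fun p => (pvPadG base.length (List.zipWith max mg (pvPat base m mm g e)) p.1 0, p.2))).map
          (fun p => pvGAsm p.1 p.2) ++
        [pvGAsm (pvPadG base.length (List.zipWith max mg (pvPat base m mm g e)) (pvGRec base (pvAln base m mm g e) 0).1 0)
          (pvGRec base (pvAln base m mm g e) 0).2] =
        (prev.map (fun p => (pvPadG base.length (List.zipWith max mg (pvPat base m mm g e)) p.1 0, p.2)) ++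
          [(pvPadG base.length (List.zipWith max mg (pvPat base m mm g e)) (pvGRec base (pvAln base m mm g e) 0).1 0,
            (pvGRec base (pvAln base m mm g e) 0).2)]).map (fun p => pvGAsm p.1 p.2) := by
      simp
    rw [hsingle]
    have hvprev' : ∀ p ∈ prev.map (fun p => (pvPadG base.length (List.zipWith max mg (pvPat base m mm g e)) p.1 0, p.2)) ++
          [(pvPadG base.length (List.zipWith max mg (pvPat base m mm g e)) (pvGRec base (pvAln base m mm g e) 0).1 0,
            (pvGRec base (pvAln base m mm g e) 0).2)],
        pvValG base p.1 p.2 0 ∧ p.1.length = p.2.length + 1 ∧ p.2.length ≤ base.length := by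
      intro p hp
      rw [List.mem_append] at hp
      rcases hp with hp | hp
      · simp only [List.mem_map] at hp
        obtain ⟨p0, hp0, rfl⟩ := hp
        obtain ⟨hv, hl1, hl2⟩ := hprev p0 hp0
        obtain ⟨dd0, dds, hdd⟩ : ∃ dd0 dds, p0.1 = dd0 :: dds := by
          cases hp0' : p0.1 with
          | nil => rw [hp0'] at hl1; simp at hl1
          | cons a t => exact ⟨a, t, rfl⟩
        refine ⟨?_, ?_, hl2⟩
        · simp only [hdd]
          rw [hdd] at hv
          exact pvPadG_valid base base.length _ p0.2 dds dd0 0 0 hv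
        · simp only [hdd]
          rw [pvPadG_len]
          rw [hdd] at hl1
          simpa using hl1
      · simp only [List.mem_singleton] at hp
        subst hp
        obtain ⟨dd0, dds, xx, hfull⟩ := pvGRec_cases base (pvAln base m mm g e) 0
        have hdd : (pvGRec base (pvAln base m mm g e) 0).1 = dd0 :: dds := by rw [hfull]
        refine ⟨?_, ?_, hcnew⟩
        · simp only [hdd]
          rw [hdd] at hvnew
          exact pvPadG_valid base base.length _ _ dds dd0 0 0 hvnew
        · simp only [hdd]
          rw [pvPadG_len]
          rw [hdd] at hlnew
          simpa using hlnew
    rw [ih (List.zipWith max mg (pvPat base m mm g e)) (hs0 ++ [e.1]) _ hmlen hmnn hvprev'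
        (fun e' he' => hcnt e' (by simp [he']))]
    refine Prod.ext ?_ (Prod.ext ?_ ?_)
    · simp only []
      rw [List.map_cons, List.foldl_cons]
    · simp only []
      simp
    · simp only [List.map_append, List.map_map, List.map_cons, List.map_nil, pvNews, pvMList]
      rw [List.append_assoc, List.singleton_append]
      congr 1

-- B's loop, characterized
lemma pvFoldB (base : List Char) (m mm g : Int) :
    ∀ (es : List (String × List Char)) (mg : List Int) (hs0 : List String)
      (prev : List (List (List Char) × List Char)),
    mg.length = base.length + 1 →
    (∀ p ∈ prev, p.1.length = p.2.length + 1 ∧ p.2.length ≤ base.length) →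
    (∀ e ∈ es, pvNd (pvAln base m mm g e) ≤ base.length) →
    es.foldl (fun (st : List Int × List String × List (List (List Char) × List Char)) e =>
        (List.zipWith max st.1 (pvGapPattern base.length (pvNwAlign base e.2 m mm g).1),
         st.2.1 ++ [e.1],
         st.2.2.map (fun r => pvPadRowG r (List.zipWith max st.1 (pvGapPattern base.length (pvNwAlign base e.2 m mm g).1)) base.length) ++
           [pvPadRowG (pvSplitRow (pvNwAlign base e.2 m mm g).2 base)
              (List.zipWith max st.1 (pvGapPattern base.length (pvNwAlign base e.2 m mm g).1)) base.length]))
      (mg, hs0, prev) =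
    (List.foldl (fun acc p => List.zipWith max acc p) mg (es.map (pvPat base m mm g)),
     hs0 ++ es.map Prod.fst,
     prev.map (fun p => (List.foldl (fun pp qq => pvPadG base.length qq pp 0) p.1
        (pvMList mg (es.map (pvPat base m mm g))), p.2))
       ++ pvNewsB base m mm g mg es) := by
  intro es
  induction es with
  | nil =>
    intro mg hs0 prev _ _ _
    simp [pvNewsB, pvMList]
  | cons e es ih =>
    intro mg hs0 prev hmg hprev hcnt
    rw [List.foldl_cons]
    simp only []
    have hpatlen : (pvPat base m mm g e).length = base.length + 1 := pvGapPattern_len _ _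
    have hmlen : (List.zipWith max mg (pvPat base m mm g e)).length = base.length + 1 := by
      rw [pvZipMax_len, hmg, hpatlen]; simp
    have hmap : prev.map (fun r => pvPadRowG r (List.zipWith max mg (pvGapPattern base.length (pvNwAlign base e.2 m mm g).1)) base.length) =
        prev.map (fun p => (pvPadG base.length (List.zipWith max mg (pvPat base m mm g e)) p.1 0, p.2)) := by
      apply List.map_congr_left
      intro p hp
      obtain ⟨hl1, hl2⟩ := hprev p hp
      have : pvPadRowG (p.1, p.2) (List.zipWith max mg (pvPat base m mm g e)) base.length =
          (pvPadG base.length (List.zipWith max mg (pvPat base m mm g e)) p.1 0, p.2) :=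
        pvPadRowG_eq base.length _ hmlen p.1 p.2 hl1 hl2
      simpa using this
    have hlnew := pvGRec_len base (pvAln base m mm g e) 0
    have hcnew : (pvGRec base (pvAln base m mm g e) 0).2.length ≤ base.length :=
      le_trans (pvGRec_anchors_le base _ 0) (hcnt e (by simp))
    have hnew : pvPadRowG (pvSplitRow (pvNwAlign base e.2 m mm g).2 base)
          (List.zipWith max mg (pvGapPattern base.length (pvNwAlign base e.2 m mm g).1)) base.length =
        (pvPadG base.length (List.zipWith max mg (pvPat base m mm g e)) (pvGRec base (pvAln base m mm g e) 0).1 0,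
         (pvGRec base (pvAln base m mm g e) 0).2) := by
      rw [show (pvNwAlign base e.2 m mm g).2 = pvAln base m mm g e from rfl, pvSplitRow_eq]
      exact pvPadRowG_eq base.length _ hmlen _ _ hlnew hcnew
    rw [hmap, hnew]
    have hprev' : ∀ p ∈ prev.map (fun p => (pvPadG base.length (List.zipWith max mg (pvPat base m mm g e)) p.1 0, p.2)) ++
          [(pvPadG base.length (List.zipWith max mg (pvPat base m mm g e)) (pvGRec base (pvAln base m mm g e) 0).1 0,
            (pvGRec base (pvAln base m mm g e) 0).2)],
        p.1.length = p.2.length + 1 ∧ p.2.length ≤ base.length := by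
      intro p hp
      rw [List.mem_append] at hp
      rcases hp with hp | hp
      · simp only [List.mem_map] at hp
        obtain ⟨p0, hp0, rfl⟩ := hp
        obtain ⟨hl1, hl2⟩ := hprev p0 hp0
        obtain ⟨dd0, dds, hdd⟩ : ∃ dd0 dds, p0.1 = dd0 :: dds := by
          cases hp0' : p0.1 with
          | nil => rw [hp0'] at hl1; simp at hl1
          | cons a t => exact ⟨a, t, rfl⟩
        refine ⟨?_, hl2⟩
        simp only [hdd]
        rw [pvPadG_len]
        rw [hdd] at hl1
        simpa using hl1
      · simp only [List.mem_singleton] at hp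
        subst hp
        obtain ⟨dd0, dds, xx, hfull⟩ := pvGRec_cases base (pvAln base m mm g e) 0
        have hdd : (pvGRec base (pvAln base m mm g e) 0).1 = dd0 :: dds := by rw [hfull]
        refine ⟨?_, hcnew⟩
        simp only [hdd]
        rw [pvPadG_len]
        rw [hdd] at hlnew
        simpa using hlnew
    rw [show pvGapPattern base.length (pvNwAlign base e.2 m mm g).1 = pvPat base m mm g e from rfl]
    rw [ih (List.zipWith max mg (pvPat base m mm g e)) (hs0 ++ [e.1]) _ hmlen hprev'
        (fun e' he' => hcnt e' (by simp [he']))]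
    refine Prod.ext ?_ (Prod.ext ?_ ?_)
    · simp only []
      rw [List.map_cons, List.foldl_cons]
    · simp only []
      simp
    · simp only [List.map_append, List.map_map, List.map_cons, List.map_nil, pvNewsB, pvMList]
      rw [List.append_assoc, List.singleton_append]
      congr 1

-- rendering B's final rows gives A's final rows
lemma pvNewsB_render (base : List Char) (m mm g : Int) (es : List (String × List Char)) (mg : List Int)
    (hcnt : ∀ e ∈ es, pvNd (pvAln base m mm g e) ≤ base.length) :
    (pvNewsB base m mm g mg es).map pvRenderRowG = pvNews base m mm g mg es := by
  rw [pvNews_eq]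
  apply List.map_congr_left
  intro p hp
  have hv := (pvNewsB_valid base m mm g es mg hcnt p hp).1
  have := pvRenderRowG_asm p.2 p.1 hv
  simpa using this

-- ===== VERDICT (by name: the statement is the Claim_ definition above) =====
theorem center_star_align_spec : Claim_equal_center_star_align := by
  intro entries match_ mismatch gap _ hpre
  unfold Spec_center_star_align center_star_align center_star_align_alt
  simp only []
  set es := entries.map (fun e => (e.1, e.2.toList)) with hes
  cases hmax : PySem.List.max? (PySem.List.pyRange 0 (entries.length : Int) 1)
      (fun i => ((PySem.List.pyGetD es i ("", [])).2.length : Int)) with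
  | none => rfl
  | some ci =>
    dsimp only
    set base := (PySem.List.pyGetD es ci ("", [])).2 with hbase_def
    -- ci is a legal index
    have hciR := PySem.List.max?_mem hmax
    rw [PySem.List.mem_pyRange_one] at hciR
    obtain ⟨hci0, hciLt⟩ := hciR
    -- the centre is a longest residue list
    have hlenle : ∀ e ∈ es, e.2.length ≤ base.length := by
      intro e he
      obtain ⟨j, hj, hje⟩ := List.mem_iff_getElem.mp he
      have hjR : (j : Int) ∈ PySem.List.pyRange 0 (entries.length : Int) 1 := by
        rw [PySem.List.mem_pyRange_one]
        constructor
        · omega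
        · have hj2 : j < entries.length := by simpa [hes] using hj
          exact_mod_cast hj2
      have := PySem.List.max?_isMax hmax (j : Int) hjR
      simp only [] at this
      rw [PySem.List.pyGetD_eq_getElem es ("", []) (by omega : (0:Int) ≤ (j:Int)) (by exact_mod_cast hj)] at this
      rw [← hbase_def] at this
      simp only [Int.toNat_natCast, hje] at this
      exact_mod_cast this
    -- residue-count bound for every aligned row
    have hcnts : ∀ e ∈ es, pvNd (pvAln base match_ mismatch gap e) ≤ base.length := by
      intro e he
      exact le_trans (pvNw_cnt base e.2 match_ mismatch gap) (hlenle e he)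
    -- characterize A's loop
    have hA := pvFoldA base match_ mismatch gap es
      (List.replicate (base.length + 1) 0) [] [] (by simp) (by simp) (by simp) hcnts
    simp only [List.map_nil, List.nil_append] at hA
    rw [hA]
    -- characterize B's loop
    have hB := pvFoldB base match_ mismatch gap es
      (List.replicate (base.length + 1) 0) [] [] (by simp) (by simp) hcnts
    simp only [List.map_nil, List.nil_append] at hB
    rw [hB]
    simp only []
    -- rows agree after rendering
    rw [pvNewsB_render base match_ mismatch gap es _ hcnts]
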